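-- pv_equiv track=rewrite | github.com/crystalxiao/myspider | python最终奥义/50题/36++.py | delate
-- ===== SOURCE A (Python) =====
-- def delate(list,yushu):
--     list1 = []
--     for m in range(len(list)):
--         if not((m + 1) % 3 == 3 - yushu) | ((yushu == 0) & ((m + 1) % 3 == 0)) :
--             list1.append(list[m])
--     yushu = (len(list) - (3 - yushu)) % 3  #多余的数（下一次的数列需要先被3减再%3）
--     list = list1
--     if len(list) > 2:
--         delate(list,yushu)
--         return delate(list,yushu)
--     else:
--         return list[1]
-- ===== SOURCE B (Python) =====
-- def delate(list, yushu):
--     cur = list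
--     y = yushu
--     while len(cur) > 2:
--         nxt = [x for m, x in enumerate(cur)
--                if not(((m + 1) % 3 == 3 - y) | ((y == 0) & ((m + 1) % 3 == 0)))]
--         y = (len(cur) - (3 - y)) % 3
--         cur = nxt
--     return cur[1]
-- ===== Notes on version B (the rewrite author's own statement) =====
-- stated objective: simpler
-- what changed: Replaces the double self-recursive calls (the first call is pure dead work, making A's call tree exponential in depth) with a single iterative while loop that filters in one comprehension per round and returns cur[1] when at most two elements remain.
import Mathlib
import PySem

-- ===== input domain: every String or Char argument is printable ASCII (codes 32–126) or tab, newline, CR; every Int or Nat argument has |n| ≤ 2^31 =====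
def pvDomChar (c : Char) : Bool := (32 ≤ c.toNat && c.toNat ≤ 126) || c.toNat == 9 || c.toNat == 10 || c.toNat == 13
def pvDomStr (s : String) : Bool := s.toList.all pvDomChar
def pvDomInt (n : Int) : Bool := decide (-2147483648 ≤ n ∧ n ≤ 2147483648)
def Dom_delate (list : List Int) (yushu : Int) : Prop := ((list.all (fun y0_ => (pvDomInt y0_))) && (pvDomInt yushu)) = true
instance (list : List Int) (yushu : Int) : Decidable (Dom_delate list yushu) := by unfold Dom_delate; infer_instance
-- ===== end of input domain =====

-- B replaces A's duplicated self-recursion (whose first call is dead work) by a single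
-- iterative loop with one filtering pass per round; equivalence is about the return value.

-- ===== PORT A =====
-- the keep-condition both Pythons write inline: not(((m+1)%3 == 3-yushu) | ((yushu==0)&((m+1)%3==0)))
def pvKeep (y m : Int) : Bool :=
  !((PySem.Int.mod (m + 1) 3 == 3 - y) || (decide (y = 0) && (PySem.Int.mod (m + 1) 3 == 0)))

-- literal port of A: build list1 by a fold over range(len(list)), then recurse twice.
-- The recursion is modelled with fuel `length + 2`, an upper bound on the recursion depth
-- (at most one round leaves the list unchanged, every other round removes an element);
-- the fuel-0 branch is unreachable at that fuel.
def delateGo : Nat → List Int → Int → Int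
  | 0, l, _ => PySem.List.pyGetD l 1 0
  | fuel + 1, l, y =>
    let list1 := (PySem.List.pyRange 0 (l.length : Int) 1).foldl
      (fun acc m => if pvKeep y m then acc ++ [PySem.List.pyGetD l m 0] else acc) []
    let y' := PySem.Int.mod ((l.length : Int) - (3 - y)) 3
    if list1.length > 2 then
      -- Python calls delate(list1, y') twice; the first result is discarded
      let _ := delateGo fuel list1 y'
      delateGo fuel list1 y'
    else PySem.List.pyGetD list1 1 0

def delate (list : List Int) (yushu : Int) : Int := delateGo (list.length + 2) list yushu

-- ===== PORT B =====
-- literal port of Source B: while len(cur) > 2, filter by a comprehension over enumerate(cur),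
-- update y from the old length, loop; the same fuel bound models the while loop.
def delateLoop : Nat → List Int → Int → Int
  | 0, cur, _ => PySem.List.pyGetD cur 1 0
  | fuel + 1, cur, y =>
    if cur.length > 2 then
      let nxt := (PySem.List.enumerate cur 0).filterMap
        (fun p => if pvKeep y p.1 then some p.2 else none)
      delateLoop fuel nxt (PySem.Int.mod ((cur.length : Int) - (3 - y)) 3)
    else PySem.List.pyGetD cur 1 0

def delate_alt (list : List Int) (yushu : Int) : Int := delateLoop (list.length + 2) list yushu

-- ===== PRECONDITION & SPEC =====
-- Pre_ excludes exactly the inputs where A raises IndexError: lists of length < 2, and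
-- 2-element lists with yushu ∈ {1,2} (there A's unconditional first filter pass removes
-- one of the two elements and list1[1] fails).
def Pre_delate (list : List Int) (yushu : Int) : Prop :=
  2 ≤ list.length ∧ (list.length = 2 → ¬(yushu = 1 ∨ yushu = 2))
instance (list : List Int) (yushu : Int) : Decidable (Pre_delate list yushu) := by
  unfold Pre_delate; infer_instance
def pvWitness_delate : List Int × Int := ([4, 8, 15, 16, 23, 42, 7], 0)

def Spec_delate (list : List Int) (yushu : Int) (out : Int) : Prop := out = delate_alt list yushu
instance (list : List Int) (yushu : Int) (out : Int) : Decidable (Spec_delate list yushu out) := by unfold Spec_delate; infer_instance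

-- ===== CLAIM (what is proved, stated in full; the proofs are below) =====
def Claim_equal_delate : Prop := ∀ (list : List Int) (yushu : Int), Dom_delate list yushu → Pre_delate list yushu → Spec_delate list yushu (delate list yushu)

-- ===== LEMMAS AND PROOFS =====

theorem filterMap_if_eq_map_filter {α β : Type} (q : α → Bool) (f : α → β) (l : List α) :
    l.filterMap (fun a => if q a then some (f a) else none) = (l.filter q).map f := by
  induction l with
  | nil => rfl
  | cons a t ih => by_cases h : q a <;> simp [h, ih]

-- A's fold over range(len l) builds the same list as B's comprehension over enumerate(l)
theorem filterA_eq_filterB (l : List Int) (y : Int) :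
    (PySem.List.pyRange 0 (l.length : Int) 1).foldl
      (fun acc m => if pvKeep y m then acc ++ [PySem.List.pyGetD l m 0] else acc) []
      = (PySem.List.enumerate l 0).filterMap
          (fun p => if pvKeep y p.1 then some p.2 else none) := by
  rw [PySem.List.foldl_append_if (pvKeep y) (fun m => PySem.List.pyGetD l m 0)]
  have he := PySem.List.enumerate_eq_map_pyRange l (0 : Int)
  simp only [PySem.List.len] at he
  rw [he, List.filterMap_map]
  have := filterMap_if_eq_map_filter (fun j => pvKeep y j) (fun j => PySem.List.pyGetD l j 0)
    (PySem.List.pyRange 0 (l.length : Int) 1)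
  simpa [Function.comp] using this.symm

theorem keep_length_le (l : List Int) (y : Int) :
    ((PySem.List.pyRange 0 (l.length : Int) 1).foldl
      (fun acc m => if pvKeep y m then acc ++ [PySem.List.pyGetD l m 0] else acc) []).length
      ≤ l.length := by
  rw [PySem.List.foldl_append_if (pvKeep y) (fun m => PySem.List.pyGetD l m 0)]
  have h := List.length_filter_le (pvKeep y) (PySem.List.pyRange 0 (l.length : Int) 1)
  simpa [PySem.List.length_pyRange_one] using h

theorem getD1_of_short (xs : List Int) (h : xs.length ≤ 1) : PySem.List.pyGetD xs 1 0 = 0 := by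
  match xs, h with
  | [], _ => decide
  | [a], _ => simp [PySem.List.pyGetD, PySem.List.pyGet?, PySem.List.pyIdx?]

-- a 2-element list with y ∉ {1,2} is left unchanged by A's filter pass
theorem filter_two_id (a b y : Int) (h1 : y ≠ 1) (h2 : y ≠ 2) :
    (PySem.List.pyRange 0 (([a, b] : List Int).length : Int) 1).foldl
      (fun acc m => if pvKeep y m then acc ++ [PySem.List.pyGetD [a, b] m 0] else acc) []
      = [a, b] := by
  have hr : PySem.List.pyRange 0 (([a, b] : List Int).length : Int) 1 = [0, 1] := by
    show PySem.List.pyRange 0 (2 : Int) 1 = [0, 1]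
    decide
  have k0 : pvKeep y 0 = true := by simp [pvKeep]; omega
  have k1 : pvKeep y 1 = true := by simp [pvKeep]; omega
  rw [hr]
  simp [List.foldl, k0, k1, PySem.List.pyGetD, PySem.List.pyGet?, PySem.List.pyIdx?]

theorem loop_of_short (fuel : Nat) (c : List Int) (y : Int) (h : ¬ c.length > 2) :
    delateLoop fuel c y = PySem.List.pyGetD c 1 0 := by
  cases fuel with
  | zero => rfl
  | succ f => simp [delateLoop, h]

theorem go_eq_loop (fuel : Nat) (l : List Int) (y : Int)
    (h2 : l.length = 2 → y ≠ 1 ∧ y ≠ 2) :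
    delateGo fuel l y = delateLoop fuel l y := by
  induction fuel generalizing l y with
  | zero => rfl
  | succ f ih =>
    by_cases hl : l.length > 2
    · simp only [delateGo, delateLoop, if_pos hl]
      rw [← filterA_eq_filterB l y]
      by_cases hf : ((PySem.List.pyRange 0 (l.length : Int) 1).foldl
          (fun acc m => if pvKeep y m then acc ++ [PySem.List.pyGetD l m 0] else acc) []).length > 2
      · rw [if_pos hf]
        exact ih _ _ (fun hc => absurd hc (by omega))
      · rw [if_neg hf, loop_of_short f _ _ hf]
    · simp only [delateGo, delateLoop, if_neg hl]
      have hle := keep_length_le l y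
      have hnf : ¬ ((PySem.List.pyRange 0 (l.length : Int) 1).foldl
          (fun acc m => if pvKeep y m then acc ++ [PySem.List.pyGetD l m 0] else acc) []).length > 2 := by
        omega
      rw [if_neg hnf]
      rcases hlen : l with _ | ⟨a, _ | ⟨b, _ | ⟨c, t⟩⟩⟩
      · simp
      · rw [getD1_of_short _ (by simpa [hlen] using hle), getD1_of_short _ (by simp)]
      · have hy := h2 (by simp [hlen])
        rw [filter_two_id a b y hy.1 hy.2]
      · simp [hlen] at hl

-- ===== VERDICT (by name: the statement is the Claim_ definition above) =====
theorem delate_spec : Claim_equal_delate := by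
  intro l y _ hpre
  unfold Spec_delate delate delate_alt
  exact go_eq_loop _ l y (fun h2 => by
    rcases hpre with ⟨_, hq⟩
    exact ⟨fun h => hq h2 (Or.inl h), fun h => hq h2 (Or.inr h)⟩)
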